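-- pv_equiv track=rewrite | github.com/kiattichai-haruansri/Chess | main.py | find_characters
-- ===== SOURCE A (Python) =====
-- def find_characters(board):
--     characters = {}
--     for i, row in enumerate(board):
--         for j, col in enumerate(row):
--             if col not in characters:
--                 characters[col] = []
--             characters[col].append((i, j))
--     return characters
-- ===== SOURCE B (Python) =====
-- def find_characters(board):
--     # Different decomposition: flatten the board once, take keys in first-appearance
--     # order via dict.fromkeys, then build each character's list by a per-key filter.
--     cells = [(col, (i, j)) for i, row in enumerate(board) for j, col in enumerate(row)]
--     keys = dict.fromkeys(c for c, _ in cells)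
--     return {c: [pos for ch, pos in cells if ch == c] for c in keys}
-- ===== Notes on version B (the rewrite author's own statement) =====
-- stated objective: alternative
-- what changed: Replaces the incremental dict-building loop with a three-phase pipeline: flatten the board into (char, position) cells, dedup the characters in first-appearance order with dict.fromkeys, then build each character's position list by filtering the flattened cells.
import Mathlib
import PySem

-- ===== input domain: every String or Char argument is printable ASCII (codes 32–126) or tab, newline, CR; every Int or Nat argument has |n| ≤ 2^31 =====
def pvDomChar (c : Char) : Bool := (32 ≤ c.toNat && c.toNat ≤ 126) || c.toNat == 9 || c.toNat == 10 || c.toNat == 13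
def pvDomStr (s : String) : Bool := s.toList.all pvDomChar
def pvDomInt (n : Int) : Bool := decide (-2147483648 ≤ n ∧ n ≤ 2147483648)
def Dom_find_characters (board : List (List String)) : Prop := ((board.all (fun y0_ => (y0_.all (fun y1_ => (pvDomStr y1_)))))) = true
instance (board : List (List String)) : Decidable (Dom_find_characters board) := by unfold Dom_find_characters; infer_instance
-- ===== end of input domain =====

-- B replaces A's incremental dict-building loop by a flatten / dedup-keys / per-key-filter
-- pipeline (alternative decomposition, same return value).

-- ===== PORT A =====
-- literal transliteration of A: nested enumerate loops growing a dict in place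
def find_characters (board : List (List String)) : List (String × List (Int × Int)) :=
  ((PySem.List.enumerate board).foldl (fun characters irow =>
      (PySem.List.enumerate irow.2).foldl (fun characters jcol =>
        let characters :=
          if characters.contains jcol.2 then characters
          else characters.insert jcol.2 ([] : List (Int × Int))
        characters.modify jcol.2 [] (fun l => l ++ [(irow.1, jcol.1)])) characters)
    PySem.Dict.empty).items

-- ===== PORT B =====
-- literal transliteration of B: flatten, dedup the keys, filter per key
def find_characters_alt (board : List (List String)) : List (String × List (Int × Int)) :=
  let cells := (PySem.List.enumerate board).flatMap (fun irow =>
    (PySem.List.enumerate irow.2).map (fun jcol => (jcol.2, (irow.1, jcol.1))))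
  let keys := PySem.List.dedup (cells.map (fun p => p.1))
  keys.map (fun c => (c, (cells.filter (fun p => p.1 == c)).map (fun p => p.2)))

-- ===== PRECONDITION & SPEC =====
def Spec_find_characters (board : List (List String)) (out : List (String × List (Int × Int))) : Prop := out = find_characters_alt board
instance (board : List (List String)) (out : List (String × List (Int × Int))) : Decidable (Spec_find_characters board out) := by unfold Spec_find_characters; infer_instance

-- ===== CLAIM (what is proved, stated in full; the proofs are below) =====
def Claim_equal_find_characters : Prop := ∀ (board : List (List String)), Dom_find_characters board → Spec_find_characters board (find_characters board)

-- ===== LEMMAS AND PROOFS =====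

-- A's "if missing insert [] then append" step is the plain modify-append step.
theorem fc_step_eq (d : PySem.Dict String (List (Int × Int))) (c : String) (p : Int × Int) :
    (if d.contains c then d else d.insert c ([] : List (Int × Int))).modify c []
        (fun l => l ++ [p]) =
      d.modify c [] (fun l => l ++ [p]) := by
  by_cases h : d.contains c
  · rw [if_pos h]
  · rw [if_neg h]
    rw [Bool.not_eq_true] at h
    have hk : c ∉ d.keys := by
      intro hc
      rw [← PySem.Dict.contains_iff_mem_keys] at hc
      simp [h] at hc
    have hmem : ∀ q ∈ d.items, q.1 ≠ c := by
      intro q hq hqc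
      exact hk (hqc ▸ PySem.Dict.mem_keys_of_mem_items d hq)
    have h2 : (PySem.Dict.mk (d.items ++ [(c, ([] : List (Int × Int)))])) = d.insert c [] := by
      apply PySem.Dict.ext
      rw [PySem.Dict.items_insert_of_not_contains d _ h]
    simp only [PySem.Dict.modify, PySem.Dict.insert, h, Bool.false_eq_true, ↓reduceIte,
      PySem.Dict.contains_mk, List.any_append, List.any_cons, BEq.rfl, List.any_nil,
      Bool.or_false, Bool.or_true, beq_iff_eq, List.map_append, List.map_cons, List.map_nil,
      PySem.Dict.ext_iff, List.append_singleton_inj, Prod.mk.injEq, List.append_cancel_right_eq,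
      true_and]
    constructor
    · conv_rhs => rw [← List.map_id d.items]
      refine List.map_congr_left ?_
      intro q hq
      simp [hmem q hq]
    · rw [h2, PySem.Dict.getD_insert_self, PySem.Dict.getD_of_not_contains d _ h]

-- A's nested fold equals the flat modify-append fold over B's flattened cells.
theorem fc_fold_flat (board : List (List String)) :
    find_characters board =
      (((PySem.List.enumerate board).flatMap (fun irow =>
          (PySem.List.enumerate irow.2).map (fun jcol => (jcol.2, (irow.1, jcol.1))))).foldl
        (fun d p => d.modify p.1 [] (fun l => l ++ [p.2])) PySem.Dict.empty).items := by
  unfold find_characters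
  rw [List.foldl_flatMap]
  congr 1
  refine PySem.List.foldl_congr_mem _ _ _ _ ?_
  intro d irow _
  rw [List.foldl_map]
  refine PySem.List.foldl_congr_mem _ _ _ _ ?_
  intro d' jcol _
  exact fc_step_eq d' jcol.2 (irow.1, jcol.1)

theorem fc_main (board : List (List String)) :
    find_characters board = find_characters_alt board := by
  rw [fc_fold_flat]
  unfold find_characters_alt
  set cells := (PySem.List.enumerate board).flatMap (fun irow =>
    (PySem.List.enumerate irow.2).map (fun jcol => (jcol.2, (irow.1, jcol.1)))) with hcells
  have hnodup : ((cells.foldl (fun d p => d.modify p.1 [] (fun l => l ++ [p.2]))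
      PySem.Dict.empty)).keys.Nodup := by
    exact PySem.Dict.nodup_keys_foldl_modify_key cells (fun p => p.1) []
      (fun d p v => v ++ [p.2]) PySem.Dict.empty (by simp [PySem.Dict.keys_empty])
  rw [PySem.Dict.items_eq_map_keys _ hnodup ([] : List (Int × Int))]
  have hkeys : ((cells.foldl (fun d p => d.modify p.1 [] (fun l => l ++ [p.2]))
      PySem.Dict.empty)).keys = PySem.List.dedup (cells.map (fun p => p.1)) := by
    rw [PySem.Dict.keys_foldl_modify_key cells (fun p => p.1) [] (fun d p v => v ++ [p.2])]
    rw [PySem.Dict.keys_empty, PySem.Set.update_nil_left, PySem.List.dedup_eq_ofList]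
  rw [hkeys]
  refine List.map_congr_left ?_
  intro c _
  rw [PySem.Dict.getD_foldl_modify_append cells PySem.Dict.empty c, PySem.Dict.getD_empty]
  simp

-- ===== VERDICT (by name: the statement is the Claim_ definition above) =====
theorem find_characters_spec : Claim_equal_find_characters := by
  intro board _
  exact fc_main board
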